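-- pv_equiv track=rewrite | github.com/ricahpir/Assignment_07 | CDInventory.py | remove_row
-- ===== SOURCE A (Python) =====
-- def remove_row(id_to_remove, table):
--     """Function to allow user to delete row.
--
--     Args:
--         id_to_remove
--         table
--
--      Returns:
--          blnCDRemoved
--
--          """
--
--     intRowNr = -1
--     blnCDRemoved = False
--     for row in table:
--         intRowNr += 1
--         if row['ID'] == id_to_remove:
--             del table[intRowNr]
--             blnCDRemoved = True
--             break
--
--     return blnCDRemoved
-- ===== SOURCE B (Python) =====
-- def remove_row(id_to_remove, table):
--     kept = []
--     removed = False
--     for row in table: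
--         if not removed and row['ID'] == id_to_remove:
--             removed = True
--         else:
--             kept.append(row)
--     table[:] = kept
--     return removed
-- ===== Notes on version B (the rewrite author's own statement) =====
-- stated objective: alternative
-- what changed: Replaces the index-tracking search with del/break by a single filtering pass that rebuilds the table (skipping the first match via a flag) and writes it back with slice assignment.
import Mathlib
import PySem

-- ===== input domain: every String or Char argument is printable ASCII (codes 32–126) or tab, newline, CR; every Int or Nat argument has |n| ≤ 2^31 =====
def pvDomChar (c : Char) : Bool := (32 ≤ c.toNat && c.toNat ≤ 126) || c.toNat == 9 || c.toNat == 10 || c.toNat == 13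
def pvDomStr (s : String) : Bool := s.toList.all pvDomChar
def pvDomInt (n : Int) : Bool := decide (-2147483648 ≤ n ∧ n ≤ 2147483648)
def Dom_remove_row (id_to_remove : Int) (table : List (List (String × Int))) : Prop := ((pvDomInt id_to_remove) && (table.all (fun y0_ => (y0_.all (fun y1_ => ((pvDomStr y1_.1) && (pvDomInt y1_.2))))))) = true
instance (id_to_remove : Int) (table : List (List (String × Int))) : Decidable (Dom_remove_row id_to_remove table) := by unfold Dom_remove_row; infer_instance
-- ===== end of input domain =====

-- B rebuilds the table in one filtering pass with a removed-flag instead of A's index search with del/break;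
-- same cost, different decomposition. Both Pythons mutate `table` identically; the equivalence proved here is
-- about the RETURN value (Bool).

-- row['ID'] is ported as List.lookup "ID" row: first-match lookup in the association list
-- (exact for the dict convention; none = KeyError).

-- ===== PORT A =====
-- the loop of A: carries intRowNr (used by the `del`, which affects only the mutated list, not the returned Bool)
def remove_row_loop (id_to_remove : Int) : List (List (String × Int)) → Int → Bool
  | [], _ => false
  | row :: rest, intRowNr =>
      let intRowNr' := intRowNr + 1
      if List.lookup "ID" row == some id_to_remove then true
      else remove_row_loop id_to_remove rest intRowNr'

def remove_row (id_to_remove : Int) (table : List (List (String × Int))) : Bool :=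
  remove_row_loop id_to_remove table (-1)

-- ===== PORT B =====
def remove_row_alt_step (id_to_remove : Int)
    (st : List (List (String × Int)) × Bool) (row : List (String × Int)) :
    List (List (String × Int)) × Bool :=
  if !st.2 && (List.lookup "ID" row == some id_to_remove) then (st.1, true)
  else (st.1 ++ [row], st.2)

def remove_row_alt (id_to_remove : Int) (table : List (List (String × Int))) : Bool :=
  (table.foldl (remove_row_alt_step id_to_remove) ([], false)).2

-- ===== PRECONDITION & SPEC =====
-- Pre_ excludes exactly the inputs where Python A raises KeyError: a row without key "ID"
-- scanned before any row matching id_to_remove (both Pythons raise there).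
def Pre_remove_row (id_to_remove : Int) (table : List (List (String × Int))) : Prop :=
  (table.takeWhile (fun r => !(List.lookup "ID" r == some id_to_remove))).all
    (fun r => r.any (fun p => p.1 == "ID")) = true
instance (id_to_remove : Int) (table : List (List (String × Int))) : Decidable (Pre_remove_row id_to_remove table) := by unfold Pre_remove_row; infer_instance

def pvWitness_remove_row : Int × (List (List (String × Int))) :=
  (2, [[("ID", 1), ("Title", 10)], [("ID", 2)], [("ID", 2), ("Artist", 5)]])

def Spec_remove_row (id_to_remove : Int) (table : List (List (String × Int))) (out : Bool) : Prop := out = remove_row_alt id_to_remove table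
instance (id_to_remove : Int) (table : List (List (String × Int))) (out : Bool) : Decidable (Spec_remove_row id_to_remove table out) := by unfold Spec_remove_row; infer_instance

-- ===== CLAIM (what is proved, stated in full; the proofs are below) =====
def Claim_equal_remove_row : Prop := ∀ (id_to_remove : Int) (table : List (List (String × Int))), Dom_remove_row id_to_remove table → Pre_remove_row id_to_remove table → Spec_remove_row id_to_remove table (remove_row id_to_remove table)

-- ===== LEMMAS AND PROOFS =====

-- once the flag is true, B's fold never resets it
theorem alt_fold_true (id : Int) (l : List (List (String × Int)))
    (kept : List (List (String × Int))) :
    (l.foldl (remove_row_alt_step id) (kept, true)).2 = true := by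
  induction l generalizing kept with
  | nil => rfl
  | cons row rest ih => simpa [remove_row_alt_step] using ih (kept ++ [row])

-- while the flag is false, B's fold result equals A's loop (any index, any kept prefix)
theorem alt_fold_eq_loop (id : Int) (l : List (List (String × Int)))
    (kept : List (List (String × Int))) (n : Int) :
    (l.foldl (remove_row_alt_step id) (kept, false)).2 = remove_row_loop id l n := by
  induction l generalizing kept n with
  | nil => rfl
  | cons row rest ih =>
      by_cases h : List.lookup "ID" row == some id
      · simp [remove_row_alt_step, remove_row_loop, h, alt_fold_true]
      · simp [remove_row_alt_step, remove_row_loop, h, ih (kept ++ [row]) (n + 1)]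

-- ===== VERDICT (by name: the statement is the Claim_ definition above) =====
theorem remove_row_spec : Claim_equal_remove_row := by
  intro id table _ _
  unfold Spec_remove_row remove_row remove_row_alt
  exact (alt_fold_eq_loop id table [] (-1)).symm
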